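-- pv_equiv track=rewrite | github.com/kamyu104/LeetCode-Solutions | Python/maximize-fixed-points-after-deletions.py | maxFixedPoints
-- ===== SOURCE A (Python) =====
-- import bisect
--
-- def maxFixedPoints(nums):
--     """
--     :type nums: List[int]
--     :rtype: int
--     """
--     def longest_increasing_subsequence(arr):
--         result = []
--         for x in arr:
--             i = bisect.bisect_left(result, x)
--             if i == len(result):
--                 result.append(x)
--             else:
--                 result[i] = x
--         return len(result)
--
--     return longest_increasing_subsequence(x for _, x in sorted((i-x, x) for i, x in enumerate(nums) if i-x >= 0))
-- ===== SOURCE B (Python) =====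
-- def maxFixedPoints(nums):
--     """
--     :type nums: List[int]
--     :rtype: int
--     """
--     arr = [x for _, x in sorted((i - x, x) for i, x in enumerate(nums) if i - x >= 0)]
--     dp = []          # (value, length of longest strictly increasing subsequence ending at it)
--     best_total = 0
--     for x in arr:
--         best = 0
--         for v, l in dp:
--             if v < x and l > best:
--                 best = l
--         dp.append((x, best + 1))
--         if best + 1 > best_total:
--             best_total = best + 1
--     return best_total
-- ===== Notes on version B (the rewrite author's own statement) =====
-- stated objective: alternative
-- what changed: The LIS length is computed by O(n^2) tabular DP over (value, best-length-ending-here) pairs with a running maximum, instead of patience sorting with bisect_left; the sort-based preprocessing is unchanged.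
import Mathlib
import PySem

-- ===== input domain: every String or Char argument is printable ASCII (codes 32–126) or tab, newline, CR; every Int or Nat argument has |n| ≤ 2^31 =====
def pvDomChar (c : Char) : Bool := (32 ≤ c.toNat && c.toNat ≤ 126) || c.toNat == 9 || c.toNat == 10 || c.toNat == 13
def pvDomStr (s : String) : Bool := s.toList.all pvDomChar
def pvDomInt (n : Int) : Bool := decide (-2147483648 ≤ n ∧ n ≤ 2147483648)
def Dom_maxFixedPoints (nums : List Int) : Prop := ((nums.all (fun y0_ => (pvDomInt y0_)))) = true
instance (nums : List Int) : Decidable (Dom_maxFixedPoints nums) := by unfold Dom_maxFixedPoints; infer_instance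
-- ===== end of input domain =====

-- B replaces patience sorting + bisect_left by an O(n^2) tabular LIS DP (alternative algorithm,
-- same sort-based preprocessing); equal return value on every input.

-- ===== PORT A =====
-- patience step: i = bisect_left(result, x); append if i == len(result) else result[i] = x
def pvStepA (r : List Int) (x : Int) : List Int :=
  let i := PySem.List.bisectLeft r x
  if i = r.length then r ++ [x] else r.set i x

def maxFixedPoints (nums : List Int) : Int :=
  -- sorted((i-x, x) for i, x in enumerate(nums) if i-x >= 0), then take the x's
  let arr := (PySem.List.sorted2
      ((PySem.List.enumerate nums).filterMap
        (fun p => if p.1 - p.2 ≥ 0 then some (p.1 - p.2, p.2) else none))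
      Prod.fst Prod.snd).map Prod.snd
  -- longest_increasing_subsequence(arr): patience list, return its length
  ((arr.foldl pvStepA []).length : Int)

-- ===== PORT B =====
-- inner DP scan: best = max length among entries with value < x (0 if none)
def pvBestIn (dp : List (Int × Int)) (x : Int) : Int :=
  dp.foldl (fun b p => if p.1 < x ∧ b < p.2 then p.2 else b) 0

-- one DP step on the state (dp table, running maximum)
def pvStepB (st : List (Int × Int) × Int) (x : Int) : List (Int × Int) × Int :=
  let best := pvBestIn st.1 x
  (st.1 ++ [(x, best + 1)], if st.2 < best + 1 then best + 1 else st.2)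

def maxFixedPoints_alt (nums : List Int) : Int :=
  let arr := (PySem.List.sorted2
      ((PySem.List.enumerate nums).filterMap
        (fun p => if p.1 - p.2 ≥ 0 then some (p.1 - p.2, p.2) else none))
      Prod.fst Prod.snd).map Prod.snd
  (arr.foldl pvStepB ([], 0)).2

-- ===== PRECONDITION & SPEC =====
def Spec_maxFixedPoints (nums : List Int) (out : Int) : Prop := out = maxFixedPoints_alt nums
instance (nums : List Int) (out : Int) : Decidable (Spec_maxFixedPoints nums out) := by unfold Spec_maxFixedPoints; infer_instance

-- ===== CLAIM (what is proved, stated in full; the proofs are below) =====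
def Claim_equal_maxFixedPoints : Prop := ∀ (nums : List Int), Dom_maxFixedPoints nums → Spec_maxFixedPoints nums (maxFixedPoints nums)

-- ===== LEMMAS AND PROOFS =====

-- Invariant tying the patience list r to the DP table dp and B's running maximum t:
-- r is strictly increasing, t = |r|, every DP length is in [1, |r|], and r[k] is the minimum
-- value among DP entries of length ≥ k+1 (and such an entry exists).
def pvInv (r : List Int) (dp : List (Int × Int)) (t : Int) : Prop :=
  r.Pairwise (· < ·) ∧ t = (r.length : Int) ∧
  (∀ p ∈ dp, 1 ≤ p.2 ∧ p.2 ≤ (r.length : Int)) ∧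
  (∀ (k : Nat) (hk : k < r.length),
      (∃ p ∈ dp, (k : Int) + 1 ≤ p.2 ∧ p.1 = r[k]) ∧
      (∀ p ∈ dp, (k : Int) + 1 ≤ p.2 → r[k] ≤ p.1))

theorem pvBestIn_ge_start (dp : List (Int × Int)) (x b : Int) :
    b ≤ dp.foldl (fun b p => if p.1 < x ∧ b < p.2 then p.2 else b) b := by
  induction dp generalizing b with
  | nil => simp
  | cons p dp ih =>
    simp only [List.foldl_cons]
    refine le_trans ?_ (ih _)
    split_ifs with h
    · exact le_of_lt h.2
    · exact le_rfl

theorem pvBestIn_ge (dp : List (Int × Int)) (x b : Int) (p : Int × Int)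
    (hp : p ∈ dp) (hlt : p.1 < x) :
    p.2 ≤ dp.foldl (fun b p => if p.1 < x ∧ b < p.2 then p.2 else b) b := by
  induction dp generalizing b with
  | nil => cases hp
  | cons q dp ih =>
    simp only [List.foldl_cons]
    rcases List.mem_cons.mp hp with rfl | hp'
    · refine le_trans ?_ (pvBestIn_ge_start dp x _)
      split_ifs with h
      · exact le_rfl
      · rcases not_and_or.mp h with h1 | h2
        · exact absurd hlt h1
        · omega
    · exact ih _ hp'

theorem pvBestIn_cases (dp : List (Int × Int)) (x b : Int) :
    dp.foldl (fun b p => if p.1 < x ∧ b < p.2 then p.2 else b) b = b ∨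
    ∃ p ∈ dp, p.1 < x ∧
      dp.foldl (fun b p => if p.1 < x ∧ b < p.2 then p.2 else b) b = p.2 := by
  induction dp generalizing b with
  | nil => exact Or.inl rfl
  | cons q dp ih =>
    simp only [List.foldl_cons]
    split_ifs with h
    · rcases ih q.2 with h0 | ⟨p, hp, h1, h2⟩
      · exact Or.inr ⟨q, List.mem_cons_self, h.1, h0⟩
      · exact Or.inr ⟨p, List.mem_cons_of_mem _ hp, h1, h2⟩
    · rcases ih b with h0 | ⟨p, hp, h1, h2⟩
      · exact Or.inl h0
      · exact Or.inr ⟨p, List.mem_cons_of_mem _ hp, h1, h2⟩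

theorem pvBest_eq (r : List Int) (dp : List (Int × Int)) (t x : Int)
    (h : pvInv r dp t) : pvBestIn dp x = (PySem.List.bisectLeft r x : Int) := by
  obtain ⟨hsort, ht, hbnd, hmin⟩ := h
  obtain ⟨hle, hlt, hge⟩ := PySem.List.bisectLeft_spec r x (hsort.imp le_of_lt)
  set i := PySem.List.bisectLeft r x with hi
  unfold pvBestIn
  apply le_antisymm
  · rcases pvBestIn_cases dp x 0 with h0 | ⟨p, hp, hpx, hpe⟩
    · rw [h0]; exact Int.natCast_nonneg i
    · rw [hpe]
      obtain ⟨hp1, hp2⟩ := hbnd p hp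
      have hm : (p.2.toNat : Int) = p.2 := Int.toNat_of_nonneg (by omega)
      have hkl : p.2.toNat - 1 < r.length := by omega
      have hle' := (hmin (p.2.toNat - 1) hkl).2 p hp (by omega)
      have hki : p.2.toNat - 1 < i := by
        by_contra hc
        have := hge (p.2.toNat - 1) hkl (by omega)
        omega
      omega
  · rcases Nat.eq_zero_or_pos i with h0 | hpos
    · rw [h0]
      simpa using pvBestIn_ge_start dp x 0
    · have hkl : i - 1 < r.length := by omega
      have hrk := hlt (i - 1) hkl (by omega)
      obtain ⟨p, hp, hp2, hp1⟩ := (hmin (i - 1) hkl).1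
      have hF := pvBestIn_ge dp x 0 p hp (by rw [hp1]; exact hrk)
      omega

theorem pvStep_inv (r : List Int) (dp : List (Int × Int)) (t x : Int)
    (h : pvInv r dp t) :
    pvInv (pvStepA r x) (pvStepB (dp, t) x).1 (pvStepB (dp, t) x).2 := by
  have hbe := pvBest_eq r dp t x h
  obtain ⟨hsort, ht, hbnd, hmin⟩ := h
  obtain ⟨hle, hlt, hge⟩ := PySem.List.bisectLeft_spec r x (hsort.imp le_of_lt)
  set i := PySem.List.bisectLeft r x with hi
  have e1 : (pvStepB (dp, t) x).1 = dp ++ [(x, (i : Int) + 1)] := by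
    simp [pvStepB, hbe]
  have e2 : (pvStepB (dp, t) x).2 = if t < (i : Int) + 1 then (i : Int) + 1 else t := by
    simp [pvStepB, hbe]
  have eA : pvStepA r x = if i = r.length then r ++ [x] else r.set i x := rfl
  rw [e1, e2, eA]
  have hsg := List.pairwise_iff_getElem.mp hsort
  by_cases hc : i = r.length
  · -- append case
    rw [if_pos hc]
    refine ⟨?_, ?_, ?_, ?_⟩
    · refine List.pairwise_append.mpr ⟨hsort, List.pairwise_singleton _ _, ?_⟩
      intro a ha b hb
      rw [List.mem_singleton] at hb
      subst hb
      obtain ⟨j, hj, rfl⟩ := List.mem_iff_getElem.mp ha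
      exact hlt j hj (hc ▸ hj)
    · simp only [List.length_append, List.length_singleton]
      split_ifs with hif
      · push_cast
        omega
      · push_cast
        omega
    · intro p hp
      rcases List.mem_append.mp hp with hp' | hp'
      · have := hbnd p hp'
        simp only [List.length_append, List.length_singleton]
        push_cast
        omega
      · rw [List.mem_singleton] at hp'
        subst hp'
        simp only [List.length_append, List.length_singleton]
        push_cast
        omega
    · intro k hk
      by_cases hk' : k < r.length
      · have hgk : (r ++ [x])[k] = r[k] := List.getElem_append_left hk'
        rw [hgk]
        obtain ⟨⟨p, hp, hp2, hp1⟩, hminK⟩ := hmin k hk'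
        refine ⟨⟨p, List.mem_append_left _ hp, hp2, hp1⟩, ?_⟩
        intro q hq hq2
        rcases List.mem_append.mp hq with hq' | hq'
        · exact hminK q hq' hq2
        · rw [List.mem_singleton] at hq'
          subst hq'
          exact le_of_lt (hlt k hk' (hc ▸ hk'))
      · have hke : k = r.length := by
          simp only [List.length_append, List.length_singleton] at hk
          omega
        subst hke
        have hgk : (r ++ [x])[r.length]'(by simp) = x := by
          simp
        rw [hgk]
        refine ⟨⟨(x, (i : Int) + 1), List.mem_append_right _ (List.mem_singleton_self _), by omega, rfl⟩, ?_⟩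
        intro q hq hq2
        rcases List.mem_append.mp hq with hq' | hq'
        · have := hbnd q hq'
          omega
        · rw [List.mem_singleton] at hq'
          subst hq'
          exact le_refl x
  · -- replace case
    rw [if_neg hc]
    have hilt : i < r.length := lt_of_le_of_ne hle hc
    have hxi : x ≤ r[i] := hge i hilt le_rfl
    refine ⟨?_, ?_, ?_, ?_⟩
    · rw [List.pairwise_iff_getElem]
      intro p q hp hq hpq
      simp only [List.length_set] at hp hq
      rw [List.getElem_set, List.getElem_set]
      split_ifs with h1 h2 h2
      · omega
      · exact lt_of_le_of_lt hxi (h1 ▸ hsg p q hp hq hpq)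
      · exact hlt p hp (by omega)
      · exact hsg p q hp hq hpq
    · rw [if_neg (by omega), List.length_set]
      exact ht
    · intro p hp
      simp only [List.length_set]
      rcases List.mem_append.mp hp with hp' | hp'
      · exact hbnd p hp'
      · rw [List.mem_singleton] at hp'
        subst hp'
        push_cast
        omega
    · intro k hk
      simp only [List.length_set] at hk
      rw [List.getElem_set]
      rcases lt_trichotomy k i with hki | hki | hki
      · rw [if_neg (by omega)]
        obtain ⟨⟨p, hp, hp2, hp1⟩, hminK⟩ := hmin k hk
        refine ⟨⟨p, List.mem_append_left _ hp, hp2, hp1⟩, ?_⟩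
        intro q hq hq2
        rcases List.mem_append.mp hq with hq' | hq'
        · exact hminK q hq' hq2
        · rw [List.mem_singleton] at hq'
          subst hq'
          exact le_of_lt (hlt k hk hki)
      · subst hki
        rw [if_pos rfl]
        refine ⟨⟨(x, (i : Int) + 1), List.mem_append_right _ (List.mem_singleton_self _), le_rfl, rfl⟩, ?_⟩
        intro q hq hq2
        rcases List.mem_append.mp hq with hq' | hq'
        · by_contra hcx
          push Not at hcx
          have := pvBestIn_ge dp x 0 q hq' hcx
          rw [pvBestIn] at hbe
          omega
        · rw [List.mem_singleton] at hq'
          subst hq'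
          exact le_refl x
      · rw [if_neg (by omega)]
        obtain ⟨⟨p, hp, hp2, hp1⟩, hminK⟩ := hmin k hk
        refine ⟨⟨p, List.mem_append_left _ hp, hp2, hp1⟩, ?_⟩
        intro q hq hq2
        rcases List.mem_append.mp hq with hq' | hq'
        · exact hminK q hq' hq2
        · rw [List.mem_singleton] at hq'
          subst hq'
          omega

theorem pvFold_inv (ys : List Int) (r : List Int) (st : List (Int × Int) × Int)
    (h : pvInv r st.1 st.2) :
    pvInv (ys.foldl pvStepA r) (ys.foldl pvStepB st).1 (ys.foldl pvStepB st).2 := by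
  induction ys generalizing r st with
  | nil => exact h
  | cons y ys ih =>
    simp only [List.foldl_cons]
    exact ih _ _ (by rcases st with ⟨dp, t⟩; exact pvStep_inv r dp t y h)

-- ===== VERDICT (by name: the statement is the Claim_ definition above) =====
theorem maxFixedPoints_spec : Claim_equal_maxFixedPoints := by
  intro nums _
  unfold Spec_maxFixedPoints maxFixedPoints maxFixedPoints_alt
  have h := pvFold_inv
    ((PySem.List.sorted2
      ((PySem.List.enumerate nums).filterMap
        (fun p => if p.1 - p.2 ≥ 0 then some (p.1 - p.2, p.2) else none))
      Prod.fst Prod.snd).map Prod.snd) [] ([], 0)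
    ⟨List.Pairwise.nil, rfl, by simp, by simp⟩
  exact h.2.1.symm
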